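-- pv_equiv track=rewrite | github.com/brendanconnelly/Fibonomial-Conjecture-Tests | fibonomial_test.py | poly_div_geometric
-- ===== SOURCE A (Python) =====
-- from typing import List, Optional, Tuple
--
-- def poly_div_geometric(P: List[int], k: int) -> List[int]:
--     """
--     Divide polynomial P exactly by [k]_q = 1 + q + ... + q^{k-1}.
--     P must be exactly divisible (no remainder); this is guaranteed when P
--     is the q-Fibonomial numerator and k = F_i for i <= n.
--
--     Algorithm (O(len(P)), no nested loops):
--         Identity: [k]_q * (q-1) = q^k - 1.
--         So if P = Q * [k]_q, then P*(q-1) = Q*(q^k-1).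
--
--         Step 1 — compute R = P*(q-1):
--             R[0]   = -P[0]
--             R[j]   =  P[j-1] - P[j]    for 1 <= j <= len(P)-1
--             R[n]   =  P[n-1]            where n = len(P)
--
--         Step 2 — recover Q from R using Q*(q^k-1) = R,
--                  i.e. Q[m-k] - Q[m] = R[m], so Q[m] = Q[m-k] - R[m]:
--             Q[m] = (Q[m-k] if m>=k else 0) - R[m]
--
--     Returns the quotient Q as a list of integers.
--     """
--     if k == 1:
--         # [1]_q = 1, identity
--         return list(P)
--
--     n = len(P)           # P has degree n-1
--     deg_Q = n - k        # Q has degree n-k, i.e. len = n-k+1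
--
--     if deg_Q < 0:
--         raise ValueError(
--             f"Divisor [k]_q has degree {k-1} but P has degree {n-1} < {k-1}"
--         )
--
--     # Step 1: R = P * (q - 1), length n+1
--     R = [0] * (n + 1)
--     R[0] = -P[0]
--     for j in range(1, n):
--         R[j] = P[j - 1] - P[j]
--     R[n] = P[n - 1]
--
--     # Step 2: Q[m] = Q[m-k] - R[m]
--     Q = [0] * (deg_Q + 1)
--     for m in range(deg_Q + 1):
--         Q[m] = (Q[m - k] if m >= k else 0) - R[m]
--
--     return Q
-- ===== SOURCE B (Python) =====
-- from typing import List
--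
-- def poly_div_geometric(P: List[int], k: int) -> List[int]:
--     """Exact division of P by [k]_q via the closed form
--     Q[m] = -sum_{i>=0, m-ik>=0} (P[m-ik-1] - P[m-ik]), with P[-1] read as 0."""
--     if k == 1:
--         return list(P)
--     n = len(P)
--     deg_Q = n - k
--     if deg_Q < 0:
--         raise ValueError(
--             f"Divisor [k]_q has degree {k-1} but P has degree {n-1} < {k-1}"
--         )
--     Q = []
--     for m in range(deg_Q + 1):
--         s = 0
--         j = m
--         while j >= 0:
--             s += (P[j - 1] if j >= 1 else 0) - P[j]
--             j -= k
--         Q.append(-s)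
--     return Q
-- ===== Notes on version B (the rewrite author's own statement) =====
-- stated objective: alternative
-- what changed: Replaces the intermediate R = P*(q-1) array and the in-place two-step recurrence Q[m] = Q[m-k] - R[m] by computing each quotient coefficient independently from its unrolled closed form Q[m] = -sum over the chain m, m-k, m-2k, ... of (P[j-1] - P[j]) with P[-1] = 0 (a per-coefficient inner scan instead of an array recurrence).
-- outside the precondition, e.g. on poly_div_geometric([1, 2], 0): A returns [1, 1, -2], B does not finish within the time limit; on poly_div_geometric([1], -1): A raises IndexError, B raises IndexError; on poly_div_geometric([], 2): A raises ValueError, B raises ValueError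
import Mathlib
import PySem

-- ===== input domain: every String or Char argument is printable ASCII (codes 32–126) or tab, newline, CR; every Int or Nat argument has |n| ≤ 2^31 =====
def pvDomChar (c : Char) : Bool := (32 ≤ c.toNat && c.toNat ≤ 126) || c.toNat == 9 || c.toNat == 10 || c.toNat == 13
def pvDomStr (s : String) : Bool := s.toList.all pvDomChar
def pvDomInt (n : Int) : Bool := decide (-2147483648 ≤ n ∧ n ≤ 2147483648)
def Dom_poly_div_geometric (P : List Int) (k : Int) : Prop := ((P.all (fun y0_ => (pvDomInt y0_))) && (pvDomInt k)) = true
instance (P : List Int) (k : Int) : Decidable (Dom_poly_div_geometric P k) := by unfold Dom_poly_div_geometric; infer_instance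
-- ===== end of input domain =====

-- B replaces A's intermediate R = P*(q-1) array and in-place recurrence Q[m] = Q[m-k] - R[m]
-- by an independent closed-form chain sum per coefficient (alternative decomposition, same values).

-- ===== PORT A =====
-- A-side helper: the list R = P*(q-1) built by A's Step 1 (replicate + the in-place writes)
def pvRlist (P : List Int) : List Int :=
  ((PySem.List.pyRange 1 (P.length : Int) 1).foldl
      (fun R j => R.set j.toNat (PySem.List.pyGetD P (j - 1) 0 - PySem.List.pyGetD P j 0))
      ((List.replicate (P.length + 1) (0 : Int)).set 0 (-(PySem.List.pyGetD P 0 0)))).set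
    P.length (PySem.List.pyGetD P ((P.length : Int) - 1) 0)

def poly_div_geometric (P : List Int) (k : Int) : List Int :=
  if k = 1 then P
  else if (P.length : Int) - k < 0 then []   -- Python raises ValueError here (outside Pre_)
  else
    (PySem.List.pyRange 0 (((P.length : Int) - k) + 1) 1).foldl
      (fun Q m => Q.set m.toNat
        ((if k ≤ m then PySem.List.pyGetD Q (m - k) 0 else 0) - PySem.List.pyGetD (pvRlist P) m 0))
      (List.replicate (((P.length : Int) - k).toNat + 1) (0 : Int))

-- ===== PORT B =====
-- B-side helper: the inner while-loop of Source B (s accumulated over j = m, m-k, m-2k, … ≥ 0);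
-- the `1 ≤ k` guard only makes the recursion total (the Python loop diverges for k ≤ 0, outside Pre_)
def pvQsum (P : List Int) (k : Int) (j : Int) : Int :=
  if _h : 0 ≤ j ∧ 1 ≤ k then
    ((if 1 ≤ j then PySem.List.pyGetD P (j - 1) 0 else 0) - PySem.List.pyGetD P j 0)
      + pvQsum P k (j - k)
  else 0
termination_by (j + 1).toNat
decreasing_by omega

def poly_div_geometric_alt (P : List Int) (k : Int) : List Int :=
  if k = 1 then P
  else if (P.length : Int) - k < 0 then []   -- Python raises ValueError here (outside Pre_)
  else (PySem.List.pyRange 0 (((P.length : Int) - k) + 1) 1).map (fun m => -(pvQsum P k m))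

-- ===== PRECONDITION & SPEC =====
-- Pre_ excludes non-positive k (A raises IndexError there, except k = 0 with nonempty P where A
-- returns a meaningless value for division by the zero polynomial [0]_q and B's while loop diverges)
-- and k ≥ 2 with len(P) < k, where both programs raise the same ValueError.
def Pre_poly_div_geometric (P : List Int) (k : Int) : Prop :=
  1 ≤ k ∧ (k = 1 ∨ k ≤ (P.length : Int))
instance (P : List Int) (k : Int) : Decidable (Pre_poly_div_geometric P k) := by
  unfold Pre_poly_div_geometric; infer_instance

def pvWitness_poly_div_geometric : List Int × Int := ([1, 1], 2)

def Spec_poly_div_geometric (P : List Int) (k : Int) (out : List Int) : Prop := out = poly_div_geometric_alt P k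
instance (P : List Int) (k : Int) (out : List Int) : Decidable (Spec_poly_div_geometric P k out) := by unfold Spec_poly_div_geometric; infer_instance

-- ===== CLAIM (what is proved, stated in full; the proofs are below) =====
def Claim_equal_poly_div_geometric : Prop := ∀ (P : List Int) (k : Int), Dom_poly_div_geometric P k → Pre_poly_div_geometric P k → Spec_poly_div_geometric P k (poly_div_geometric P k)

-- ===== LEMMAS AND PROOFS =====

-- the coefficient of q^m in P*(q-1), with P[-1] read as 0
def pvRfun (P : List Int) (m : Int) : Int :=
  (if 1 ≤ m then PySem.List.pyGetD P (m - 1) 0 else 0) - PySem.List.pyGetD P m 0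

-- a write-only foldl over a range of indices: entry i ends up f i iff the range wrote it
lemma pv_foldl_set_getElem? (f : Int → Int) (b : Int) :
    ∀ (fuel : Nat) (a : Int) (L : List Int), 0 ≤ a → (b - a).toNat = fuel → ∀ (i : Nat),
      ((PySem.List.pyRange a b 1).foldl (fun R j => R.set j.toNat (f j)) L)[i]? =
        if a ≤ (i : Int) ∧ (i : Int) < b ∧ i < L.length then some (f i) else L[i]? := by
  intro fuel
  induction fuel with
  | zero =>
    intro a L ha hf i
    rw [PySem.List.pyRange_one_eq_nil (by omega)]
    simp only [List.foldl_nil]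
    rw [if_neg (by omega)]
  | succ n ih =>
    intro a L ha hf i
    rw [PySem.List.pyRange_one_cons (by omega)]
    simp only [List.foldl_cons]
    rw [ih (a + 1) _ (by omega) (by omega) i]
    rcases eq_or_ne (i : Int) a with hia | hia
    · have hi : i = a.toNat := by omega
      subst hi
      simp only [Int.toNat_of_nonneg ha]
      rw [if_neg (by omega), List.getElem?_set, if_pos rfl]
      by_cases hlen : a.toNat < L.length
      · rw [if_pos hlen, if_pos ⟨by omega, by omega, hlen⟩]
      · rw [if_neg hlen, if_neg (by omega), List.getElem?_eq_none (by omega)]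
    · rw [List.length_set]
      by_cases hc : a + 1 ≤ (i : Int) ∧ (i : Int) < b ∧ i < L.length
      · rw [if_pos hc, if_pos (by omega)]
      · rw [if_neg hc, if_neg (by omega)]
        rw [List.getElem?_set_ne (by omega)]

lemma pv_foldl_set_length {α : Type} (g : Int → Nat) (f : List α → Int → α) :
    ∀ (l : List Int) (L : List α),
      (l.foldl (fun R j => R.set (g j) (f R j)) L).length = L.length := by
  intro l
  induction l with
  | nil => intro L; rfl
  | cons x xs ih => intro L; simp [ih]

lemma pvRlist_char (P : List Int) (i : Nat) (hi : i < P.length) :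
    (pvRlist P)[i]? = some (pvRfun P (i : Int)) := by
  unfold pvRlist
  rw [List.getElem?_set_ne (by omega)]
  rw [pv_foldl_set_getElem? _ _ ((P.length : Int) - 1).toNat 1 _ (by omega) (by omega) i]
  simp only [List.length_set, List.length_replicate]
  by_cases h1 : 1 ≤ (i : Int)
  · rw [if_pos ⟨h1, by omega, by omega⟩]
    simp [pvRfun, h1]
  · have hi0 : i = 0 := by omega
    subst hi0
    rw [if_neg (by omega), List.getElem?_set_self (by simp)]
    simp [pvRfun]

lemma pvRlist_length (P : List Int) : (pvRlist P).length = P.length + 1 := by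
  unfold pvRlist
  rw [List.length_set]
  rw [pv_foldl_set_length (fun j => j.toNat)
    (fun _ j => PySem.List.pyGetD P (j - 1) 0 - PySem.List.pyGetD P j 0)]
  simp

lemma pvQsum_step (P : List Int) (k t : Int) (hk : 2 ≤ k) (ht : 0 ≤ t) :
    -(pvQsum P k t) = (if k ≤ t then -(pvQsum P k (t - k)) else 0) - pvRfun P t := by
  rw [pvQsum, dif_pos ⟨ht, by omega⟩]
  by_cases hkt : k ≤ t
  · rw [if_pos hkt]
    simp [pvRfun]; ring
  · rw [if_neg hkt]
    rw [show pvQsum P k (t - k) = 0 by rw [pvQsum, dif_neg (by omega)]]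
    simp [pvRfun]

lemma pvQ_inv (P : List Int) (k : Int) (hk2 : 2 ≤ k) (hkn : k ≤ (P.length : Int)) :
    ∀ (t : Nat), (t : Int) ≤ (P.length : Int) - k + 1 → ∀ (i : Nat),
      ((PySem.List.pyRange 0 (t : Int) 1).foldl
        (fun Q m => Q.set m.toNat
          ((if k ≤ m then PySem.List.pyGetD Q (m - k) 0 else 0) - PySem.List.pyGetD (pvRlist P) m 0))
        (List.replicate (((P.length : Int) - k).toNat + 1) (0 : Int)))[i]? =
      if i < ((P.length : Int) - k).toNat + 1 then
        some (if (i : Int) < (t : Int) then -(pvQsum P k (i : Int)) else 0) else none := by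
  intro t
  induction t with
  | zero =>
    intro _ i
    rw [show ((0 : Nat) : Int) = 0 by rfl, PySem.List.pyRange_one_eq_nil (by omega)]
    simp only [List.foldl_nil, List.getElem?_replicate]
    split_ifs with h1 h2
    · omega
    · rfl
    · rfl
  | succ t ih =>
    intro ht i
    have ht' : (t : Int) ≤ (P.length : Int) - k + 1 := by push_cast at ht ⊢; omega
    have ihh := ih ht'
    rw [show ((t + 1 : Nat) : Int) = (t : Int) + 1 by push_cast; ring]
    rw [PySem.List.pyRange_one_succ_right (by positivity)]
    rw [List.foldl_append, List.foldl_cons, List.foldl_nil]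
    have hlen : (((PySem.List.pyRange 0 (t : Int) 1).foldl
        (fun Q m => Q.set m.toNat
          ((if k ≤ m then PySem.List.pyGetD Q (m - k) 0 else 0) - PySem.List.pyGetD (pvRlist P) m 0))
        (List.replicate (((P.length : Int) - k).toNat + 1) (0 : Int)))).length
        = ((P.length : Int) - k).toNat + 1 := by
      rw [pv_foldl_set_length (fun m => m.toNat)
        (fun Q m => (if k ≤ m then PySem.List.pyGetD Q (m - k) 0 else 0) - PySem.List.pyGetD (pvRlist P) m 0)]
      simp
    have hval : ((if k ≤ (t : Int) then PySem.List.pyGetD ((PySem.List.pyRange 0 (t : Int) 1).foldl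
        (fun Q m => Q.set m.toNat
          ((if k ≤ m then PySem.List.pyGetD Q (m - k) 0 else 0) - PySem.List.pyGetD (pvRlist P) m 0))
        (List.replicate (((P.length : Int) - k).toNat + 1) (0 : Int))) ((t : Int) - k) 0 else 0)
        - PySem.List.pyGetD (pvRlist P) (t : Int) 0) = -(pvQsum P k (t : Int)) := by
      rw [pvQsum_step P k (t : Int) hk2 (by positivity)]
      congr 1
      · by_cases hkt : k ≤ (t : Int)
        · rw [if_pos hkt, if_pos hkt]
          rw [PySem.List.pyGetD_eq_getElem _ _ (by omega) (by rw [hlen]; push_cast at ht ⊢; omega)]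
          have h2 := ihh (((t : Int) - k).toNat)
          rw [List.getElem?_eq_getElem (by rw [hlen]; push_cast at ht; omega)] at h2
          rw [if_pos (by push_cast at ht; omega), if_pos (by push_cast at ht; omega)] at h2
          rw [Option.some.inj h2]
          have hc : ((((t : Int) - k).toNat : Nat) : Int) = (t : Int) - k := by omega
          rw [hc]
        · rw [if_neg hkt, if_neg hkt]
      · rw [PySem.List.pyGetD_eq_getElem _ _ (by positivity)
          (by rw [pvRlist_length]; push_cast at ht ⊢; omega)]
        simp only [Int.toNat_natCast]
        have h3 := pvRlist_char P t (by push_cast at ht; omega)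
        rw [List.getElem?_eq_getElem (by rw [pvRlist_length]; push_cast at ht; omega)] at h3
        exact Option.some.inj h3
    rw [hval]
    rw [List.getElem?_set]
    simp only [Int.toNat_natCast]
    by_cases hit : i = t
    · subst hit
      rw [if_pos rfl, if_pos (by rw [hlen]; push_cast at ht ⊢; omega)]
      rw [if_pos (by push_cast at ht; omega), if_pos (by omega)]
    · rw [if_neg (by omega), ihh i]
      by_cases hi : i < ((P.length : Int) - k).toNat + 1
      · rw [if_pos hi, if_pos hi]
        congr 1
        by_cases hlt : (i : Int) < (t : Int)
        · rw [if_pos hlt, if_pos (by omega)]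
        · rw [if_neg hlt, if_neg (by omega)]
      · simp only [if_neg hi]

-- ===== VERDICT (by name: the statement is the Claim_ definition above) =====
theorem poly_div_geometric_spec : Claim_equal_poly_div_geometric := by
  intro P k _hdom hpre
  obtain ⟨h1, h2⟩ := hpre
  unfold Spec_poly_div_geometric poly_div_geometric poly_div_geometric_alt
  by_cases hk : k = 1
  · rw [if_pos hk, if_pos hk]
  · have hk2 : 2 ≤ k := by omega
    have hkn : k ≤ (P.length : Int) := h2.resolve_left hk
    rw [if_neg hk, if_neg hk, if_neg (by omega), if_neg (by omega)]
    apply List.ext_getElem?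
    intro i
    have hcast : (((((P.length : Int) - k).toNat + 1 : Nat)) : Int) = (P.length : Int) - k + 1 := by
      omega
    rw [show ((P.length : Int) - k + 1) = ((((P.length : Int) - k).toNat + 1 : Nat) : Int) from hcast.symm]
    rw [pvQ_inv P k hk2 hkn (((P.length : Int) - k).toNat + 1) (by omega) i]
    rw [List.getElem?_map, PySem.List.getElem?_pyRange_one]
    by_cases hi : i < ((P.length : Int) - k).toNat + 1
    · rw [if_pos hi, if_pos (by omega), if_pos (by push_cast; omega)]
      simp
    · rw [if_neg hi, if_neg (by omega)]
      rfl
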